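-- pv_equiv track=rewrite | github.com/sagemath/sage-archive-2023-02-01 | src/sage/combinat/growth.py | is_P_edge
-- ===== SOURCE A (Python) =====
-- def is_P_edge(v, w):
--     r"""
--     Return whether ``(v, w)`` is a `P`-edge of ``self``.
--
--     ``(v, w)`` is an edge if ``v`` is obtained from ``w`` by deleting
--     a ``1`` or replacing the left-most ``2`` by a ``1``.
--
--     EXAMPLES::
--
--         sage: YF = GrowthDiagram.rules.YoungFibonacci()
--         sage: v = YF.vertices(5)[5]; v
--         word: 1121
--         sage: [w for w in YF.vertices(6) if YF.is_P_edge(v, w)]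
--         [word: 2121, word: 11121]
--         sage: [w for w in YF.vertices(7) if YF.is_P_edge(v, w)]
--         []
--     """
--     if sum(w) != sum(v) + 1:
--         return False
--     ell = len(v)
--     w = list(w)
--     for i in range(ell+1):
--         d = list(v)
--         d.insert(i, 1)
--         if w == d:
--             return True
--         if i < ell and v[i] == 1:
--             d = list(v)
--             d[i] = 2
--             if w == d:
--                 return True
--             break
--     return False
-- ===== SOURCE B (Python) =====
-- def is_P_edge(v, w):
--     n = len(v)
--     if len(w) == n + 1:
--         # i0 = index of the first 1 in v (n if none)
--         i0 = 0
--         while i0 < n and v[i0] != 1: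
--             i0 += 1
--         # j = first index where w diverges from v (n if w starts with v)
--         j = 0
--         while j < n and w[j] == v[j]:
--             j += 1
--         c = min(j, i0)
--         return w == v[:c] + [1] + v[c:]
--     if len(w) == n:
--         i0 = 0
--         while i0 < n and v[i0] != 1:
--             i0 += 1
--         return i0 < n and w == v[:i0] + [2] + v[i0+1:]
--     return False
-- ===== Notes on version B (the rewrite author's own statement) =====
-- stated objective: alternative
-- what changed: A sums both words and then enumerates candidate words (a 1 inserted at every position up to the first 1 of v, each built and compared wholesale to w); B computes no sums: it dispatches on the lengths, locates the first 1 of v and the first divergence of w from v by single scans, and compares the one canonical insertion (or replacement) candidate.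
import Mathlib
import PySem

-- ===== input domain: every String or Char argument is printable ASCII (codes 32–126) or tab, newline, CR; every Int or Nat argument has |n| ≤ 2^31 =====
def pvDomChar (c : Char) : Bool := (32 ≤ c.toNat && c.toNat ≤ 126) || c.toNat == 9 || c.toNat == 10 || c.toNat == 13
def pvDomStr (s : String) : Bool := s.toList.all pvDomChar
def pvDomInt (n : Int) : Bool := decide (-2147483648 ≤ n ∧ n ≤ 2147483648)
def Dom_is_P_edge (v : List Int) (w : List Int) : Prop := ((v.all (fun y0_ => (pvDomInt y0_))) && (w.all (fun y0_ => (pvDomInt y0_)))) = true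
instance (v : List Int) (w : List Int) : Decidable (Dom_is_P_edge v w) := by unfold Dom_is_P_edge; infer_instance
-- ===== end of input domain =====

-- B replaces A's sum pre-check and candidate-enumeration loop (each insertion/replacement candidate built and
-- compared wholesale to w) by length dispatch plus single scans locating the first 1 of v and the first
-- divergence of w from v; objective: a genuinely different algorithm of similar cost.


-- ===== PORT A =====
-- the 'for i in range(ell+1)' loop: insertion candidate, then replacement candidate + break at the first 1
def is_P_edge_loop (v w : List Int) (ell : Nat) : Nat → Nat → Bool
  | 0, _ => false
  | fuel+1, i =>
    let d := PySem.List.insert v (i : Int) 1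
    if w = d then true
    else if i < ell ∧ PySem.List.pyGetD v (i : Int) 0 = 1 then
      decide (w = v.set i 2)
    else is_P_edge_loop v w ell fuel (i+1)

def is_P_edge (v : List Int) (w : List Int) : Bool :=
  if w.sum ≠ v.sum + 1 then false
  else is_P_edge_loop v w v.length (v.length + 1) 0

-- ===== PORT B =====
-- 'while i0 < n and v[i0] != 1: i0 += 1'
def altFirstOne : List Int → Nat
  | [] => 0
  | x :: t => if x ≠ 1 then altFirstOne t + 1 else 0
-- 'while j < n and w[j] == v[j]: j += 1'
def altDiverge : List Int → List Int → Nat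
  | [], _ => 0
  | _ :: _, [] => 0
  | a :: v, b :: w => if b = a then altDiverge v w + 1 else 0
def is_P_edge_alt (v : List Int) (w : List Int) : Bool :=
  let n := v.length
  if w.length = n + 1 then
    let i0 := altFirstOne v
    let j := altDiverge v w
    let c := min j i0
    decide (w = v.take c ++ 1 :: v.drop c)
  else if w.length = n then
    let i0 := altFirstOne v
    decide (i0 < n) && decide (w = v.take i0 ++ 2 :: v.drop (i0 + 1))
  else false

-- ===== PRECONDITION & SPEC =====
def Spec_is_P_edge (v : List Int) (w : List Int) (out : Bool) : Prop := out = is_P_edge_alt v w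
instance (v : List Int) (w : List Int) (out : Bool) : Decidable (Spec_is_P_edge v w out) := by unfold Spec_is_P_edge; infer_instance

-- ===== CLAIM (what is proved, stated in full; the proofs are below) =====
def Claim_equal_is_P_edge : Prop := ∀ (v : List Int) (w : List Int), Dom_is_P_edge v w → Spec_is_P_edge v w (is_P_edge v w)

-- ===== LEMMAS AND PROOFS =====

-- insertion of a 1 at position k, the shape of both programs' insertion candidates
def pvIns (v : List Int) (k : Nat) : List Int := v.take k ++ 1 :: v.drop k

lemma length_pvIns (v : List Int) (k : Nat) (h : k ≤ v.length) :
    (pvIns v k).length = v.length + 1 := by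
  simp [pvIns]

lemma sum_pvIns (v : List Int) (k : Nat) :
    (pvIns v k).sum = v.sum + 1 := by
  simp [pvIns]
  have := List.sum_take_add_sum_drop v k
  omega

lemma altFirstOne_le (v : List Int) : altFirstOne v ≤ v.length := by
  induction v with
  | nil => simp [altFirstOne]
  | cons x t ih => simp [altFirstOne]; split <;> simp <;> omega

lemma altFirstOne_at (v : List Int) (h : altFirstOne v < v.length) :
    v[altFirstOne v] = 1 := by
  induction v with
  | nil => simp at h
  | cons x t ih =>
    by_cases hx : x = 1
    · simp [altFirstOne, hx]
    · simp only [altFirstOne, if_pos hx] at h ⊢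
      simpa using ih (by simpa using h)

lemma altFirstOne_before (v : List Int) (m : Nat) (hm : m < altFirstOne v)
    (hlt : m < v.length) : v[m] ≠ 1 := by
  induction v generalizing m with
  | nil => simp at hlt
  | cons x t ih =>
    by_cases hx : x = 1
    · simp [altFirstOne, hx] at hm
    · simp only [altFirstOne, if_pos hx] at hm
      cases m with
      | zero => simpa using hx
      | succ m => simp only [List.getElem_cons_succ]; exact ih m (by omega) (by simpa using hlt)

lemma altDiverge_ins_self (v : List Int) : altDiverge v (v ++ [1]) = v.length := by
  induction v with
  | nil => simp [altDiverge]
  | cons a t ih => simp [altDiverge, ih]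

lemma altDiverge_ins_ne (v : List Int) (k : Nat) (h : k < v.length) (hne : v[k] ≠ 1) :
    altDiverge v (pvIns v k) = k := by
  induction v generalizing k with
  | nil => simp at h
  | cons a t ih =>
    cases k with
    | zero => simp [pvIns, altDiverge]; intro h1; exact absurd h1.symm (by simpa using hne)
    | succ k =>
      simp only [pvIns, List.take_succ_cons, List.drop_succ_cons, List.cons_append, altDiverge,
        if_true]
      rw [show List.take k t ++ 1 :: List.drop k t = pvIns t k from rfl,
        ih k (by simpa using h) (by simpa using hne)]

lemma altDiverge_ins_ge (v : List Int) (k : Nat) (h : k ≤ v.length) :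
    k ≤ altDiverge v (pvIns v k) := by
  induction v generalizing k with
  | nil => simp at h; omega
  | cons a t ih =>
    cases k with
    | zero => omega
    | succ k =>
      simp only [pvIns, List.take_succ_cons, List.drop_succ_cons, List.cons_append, altDiverge,
        if_true]
      have := ih k (by simpa using h)
      simp only [pvIns] at this
      omega

lemma set_eq_take_drop (v : List Int) (k : Nat) (h : k < v.length) :
    v.set k 2 = v.take k ++ 2 :: v.drop (k + 1) := by
  simp [List.set_eq_take_append_cons_drop, h]

lemma sum_set (v : List Int) (k : Nat) (h : k < v.length) (h1 : v[k] = 1) :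
    (v.set k 2).sum = v.sum + 1 := by
  rw [set_eq_take_drop v k h]
  conv_rhs => rw [← List.take_append_drop k v, List.drop_eq_getElem_cons h, h1]
  simp
  omega

lemma loop_iff (v w : List Int) (i fuel : Nat)
    (hfuel : fuel = v.length + 1 - i) (hi : i ≤ v.length) :
    is_P_edge_loop v w v.length fuel i = true ↔
      ((∃ k, i ≤ k ∧ k ≤ i + altFirstOne (v.drop i) ∧ w = pvIns v k) ∨
       (i + altFirstOne (v.drop i) < v.length ∧
        w = v.set (i + altFirstOne (v.drop i)) 2)) := by
  induction fuel generalizing i with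
  | zero => omega
  | succ fuel ih =>
    have hins : PySem.List.insert v (i : Int) 1 = pvIns v i :=
      PySem.List.insert_natCast v i 1 hi
    rw [is_P_edge_loop]
    simp only [hins]
    by_cases hwi : w = pvIns v i
    · rw [if_pos hwi]
      simp only [true_iff]
      exact Or.inl ⟨i, le_refl _, by omega, hwi⟩
    · rw [if_neg hwi]
      by_cases hend : i = v.length
      · subst hend
        simp only [List.drop_length, altFirstOne, Nat.add_zero, lt_irrefl, false_and, if_neg,
          and_false, or_false]
        have hf0 : fuel = 0 := by omega
        subst hf0
        simp only [is_P_edge_loop, if_false, Bool.false_eq_true, false_iff]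
        rintro ⟨k, hk1, hk2, hw⟩
        have : k = v.length := by omega
        exact hwi (this ▸ hw)
      · have hilt : i < v.length := by omega
        have hdrop : v.drop i = v[i] :: v.drop (i+1) := List.drop_eq_getElem_cons hilt
        have hget : PySem.List.pyGetD v (i : Int) 0 = v[i] := by
          rw [PySem.List.pyGetD_natCast, List.getD_eq_getElem v 0 hilt]
        by_cases h1 : v[i] = 1
        · -- first 1 found at i: check replacement, then break
          have hf : altFirstOne (v.drop i) = 0 := by rw [hdrop]; simp [altFirstOne, h1]
          rw [hf, if_pos ⟨hilt, by rw [hget, h1]⟩]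
          simp only [Nat.add_zero, decide_eq_true_eq]
          constructor
          · intro h
            exact Or.inr ⟨hilt, h⟩
          · rintro (⟨k, hk1, hk2, hw⟩ | ⟨-, hw⟩)
            · have : k = i := by omega
              exact absurd (this ▸ hw) hwi
            · exact hw
        · -- v[i] ≠ 1: continue with i+1
          have hf : altFirstOne (v.drop i) = altFirstOne (v.drop (i+1)) + 1 := by
            rw [hdrop]; simp [altFirstOne, h1]
          rw [if_neg (by rintro ⟨-, h⟩; rw [hget] at h; exact h1 h),
            ih (i+1) (by omega) (by omega), hf]
          constructor
          · rintro (⟨k, hk1, hk2, hw⟩ | ⟨hlt, hw⟩)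
            · exact Or.inl ⟨k, by omega, by omega, hw⟩
            · exact Or.inr ⟨by omega, by rw [hw]; congr 1; omega⟩
          · rintro (⟨k, hk1, hk2, hw⟩ | ⟨hlt, hw⟩)
            · have hki : k ≠ i := fun h => hwi (h ▸ hw)
              exact Or.inl ⟨k, by omega, by omega, hw⟩
            · exact Or.inr ⟨by omega, by rw [hw]; congr 1; omega⟩

theorem a_iff (v w : List Int) :
    is_P_edge v w = true ↔
      (w.sum = v.sum + 1 ∧
        ((∃ k, k ≤ altFirstOne v ∧ w = pvIns v k) ∨
         (altFirstOne v < v.length ∧ w = v.set (altFirstOne v) 2))) := by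
  rw [is_P_edge]
  by_cases hs : w.sum = v.sum + 1
  · rw [if_neg (by simp [hs]), loop_iff v w 0 (v.length + 1) (by omega) (by omega)]
    simp only [List.drop_zero, Nat.zero_add]
    constructor
    · rintro (⟨k, -, hk2, hw⟩ | h)
      exacts [⟨hs, Or.inl ⟨k, hk2, hw⟩⟩, ⟨hs, Or.inr h⟩]
    · rintro ⟨-, (⟨k, hk2, hw⟩ | h)⟩
      exacts [Or.inl ⟨k, Nat.zero_le _, hk2, hw⟩, Or.inr h]
  · rw [if_pos hs]
    simp [hs]

theorem b_iff (v w : List Int) :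
    is_P_edge_alt v w = true ↔
      ((w.length = v.length + 1 ∧ w = pvIns v (min (altDiverge v w) (altFirstOne v))) ∨
       (w.length = v.length ∧ altFirstOne v < v.length ∧
        w = v.take (altFirstOne v) ++ 2 :: v.drop (altFirstOne v + 1))) := by
  rw [is_P_edge_alt]
  by_cases h1 : w.length = v.length + 1
  · rw [if_pos h1]
    simp only [decide_eq_true_eq]
    constructor
    · intro h; exact Or.inl ⟨h1, h⟩
    · rintro (⟨-, h⟩ | ⟨h2, -, -⟩)
      · exact h
      · omega
  · rw [if_neg h1]
    by_cases h2 : w.length = v.length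
    · rw [if_pos h2]
      simp only [Bool.and_eq_true, decide_eq_true_eq]
      constructor
      · rintro ⟨ha, hb⟩; exact Or.inr ⟨h2, ha, hb⟩
      · rintro (⟨h, -⟩ | ⟨-, ha, hb⟩)
        · omega
        · exact ⟨ha, hb⟩
    · rw [if_neg h2]
      simp only [Bool.false_eq_true, false_iff]
      rintro (⟨h, -⟩ | ⟨h, -⟩) <;> omega

theorem main_eq (v w : List Int) : is_P_edge v w = is_P_edge_alt v w := by
  rw [Bool.eq_iff_iff, a_iff, b_iff]
  constructor
  · rintro ⟨hs, (⟨k, hk, hw⟩ | ⟨hlt, hw⟩)⟩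
    · have hkn : k ≤ v.length := le_trans hk (altFirstOne_le v)
      left
      refine ⟨by rw [hw]; exact length_pvIns v k hkn, ?_⟩
      by_cases hke : k = v.length
      · subst hke
        have hi0 : altFirstOne v = v.length := by have := altFirstOne_le v; omega
        have hdiv : altDiverge v w = v.length := by
          rw [hw]; simpa [pvIns] using altDiverge_ins_self v
        rw [hdiv, hi0, min_self]
        exact hw
      · have hklt : k < v.length := by omega
        by_cases hk1 : v[k] = 1
        · have hki0 : k = altFirstOne v := by
            by_contra hne
            exact altFirstOne_before v k (by omega) hklt hk1
          have hge := altDiverge_ins_ge v k hkn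
          rw [← hw] at hge
          have : min (altDiverge v w) (altFirstOne v) = k := by omega
          rw [this]; exact hw
        · have hdiv : altDiverge v w = k := by rw [hw]; exact altDiverge_ins_ne v k hklt hk1
          have : min (altDiverge v w) (altFirstOne v) = k := by omega
          rw [this]; exact hw
    · right
      refine ⟨by rw [hw]; simp, hlt, ?_⟩
      rw [hw, set_eq_take_drop v _ hlt]
  · rintro (⟨hlen, hw⟩ | ⟨hlen, hlt, hw⟩)
    · refine ⟨by rw [hw]; exact sum_pvIns v _, Or.inl ⟨_, min_le_right _ _, hw⟩⟩
    · have hw' : w = v.set (altFirstOne v) 2 := by rw [hw, set_eq_take_drop v _ hlt]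
      exact ⟨by rw [hw']; exact sum_set v _ hlt (altFirstOne_at v hlt), Or.inr ⟨hlt, hw'⟩⟩

-- ===== VERDICT (by name: the statement is the Claim_ definition above) =====
theorem is_P_edge_spec : Claim_equal_is_P_edge := by
  intro v w _
  unfold Spec_is_P_edge
  exact main_eq v w
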